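-- pv_equiv track=rewrite | github.com/TheDongLab/EVscope | bin/Step_25_EMapper.py | _is_polya_stretch
-- ===== SOURCE A (Python) =====
-- from typing import List, Tuple, Dict, Any, Generator, Set, Optional, Union
--
-- def _find_longest_consecutive_run(seq: str, base: str) -> Tuple[int, int, int]:
--     """Find longest consecutive run of base. Returns (length, start, end)."""
--     max_run, max_start, max_end = 0, 0, 0
--     current_run, current_start = 0, 0
--     for i, c in enumerate(seq):
--         if c == base:
--             if current_run == 0:
--                 current_start = i
--             current_run += 1
--             if current_run > max_run:
--                 max_run = current_run
--                 max_start = current_start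
--                 max_end = i + 1
--         else:
--             current_run = 0
--     return max_run, max_start, max_end
--
-- def _is_polya_stretch(seq: str, quals: Optional[Tuple[int, ...]], base: str,
--                       min_len: int, min_qual: int = 20) -> bool:
--     """Check for consecutive poly(A/T) with quality filtering on the run."""
--     if len(seq) < min_len:
--         return False
--     longest_run, run_start, run_end = _find_longest_consecutive_run(seq, base)
--     if longest_run < min_len:
--         return False
--     if quals is not None and len(quals) >= run_end:
--         run_quals = quals[run_start:run_end]
--         if sum(1 for q in run_quals if q >= min_qual) < min_len:
--             return False
--     return True
-- ===== SOURCE B (Python) =====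
-- from typing import List, Tuple, Dict, Any, Generator, Set, Optional, Union
--
-- def _is_polya_stretch(seq: str, quals: Optional[Tuple[int, ...]], base: str,
--                       min_len: int, min_qual: int = 20) -> bool:
--     """Check for consecutive poly(A/T) with quality filtering on the run.
--
--     Two-phase shape: enumerate all maximal runs of `base` as (length, start, end)
--     triples, pick the longest (first on tie) with max(), then apply the guards."""
--     if len(seq) < min_len:
--         return False
--     runs = []
--     i, n = 0, len(seq)
--     while i < n:
--         if seq[i] == base:
--             j = i + 1
--             while j < n and seq[j] == base:
--                 j += 1
--             runs.append((j - i, i, j))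
--             i = j
--         else:
--             i += 1
--     longest_run, run_start, run_end = max(runs, key=lambda r: r[0], default=(0, 0, 0))
--     if longest_run < min_len:
--         return False
--     if quals is not None and len(quals) >= run_end:
--         run_quals = quals[run_start:run_end]
--         if sum(1 for q in run_quals if q >= min_qual) < min_len:
--             return False
--     return True
-- ===== Notes on version B (the rewrite author's own statement) =====
-- stated objective: alternative
-- what changed: Replaces A's single-pass five-variable state machine (current run + running max with start/end bookkeeping) by a two-phase shape: first enumerate all maximal runs of base as (length, start, end) triples, then select the longest via max(key=len, first on tie), then apply the same guards.
import Mathlib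
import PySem

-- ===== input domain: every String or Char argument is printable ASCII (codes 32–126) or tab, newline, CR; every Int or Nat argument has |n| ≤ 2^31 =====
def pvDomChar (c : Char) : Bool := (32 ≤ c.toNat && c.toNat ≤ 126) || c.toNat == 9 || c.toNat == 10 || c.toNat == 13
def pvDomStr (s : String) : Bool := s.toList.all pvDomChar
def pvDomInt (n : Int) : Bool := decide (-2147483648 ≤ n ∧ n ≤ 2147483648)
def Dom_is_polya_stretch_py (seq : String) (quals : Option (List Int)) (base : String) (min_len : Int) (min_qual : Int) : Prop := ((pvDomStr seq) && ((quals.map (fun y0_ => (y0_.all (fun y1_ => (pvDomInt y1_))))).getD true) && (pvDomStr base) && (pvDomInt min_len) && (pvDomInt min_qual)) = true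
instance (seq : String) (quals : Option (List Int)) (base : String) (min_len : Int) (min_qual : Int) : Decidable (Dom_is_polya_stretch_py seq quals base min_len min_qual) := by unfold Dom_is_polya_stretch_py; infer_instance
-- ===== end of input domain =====

-- B replaces A's single-pass running-max state machine by run-length enumeration
-- followed by max-by-length selection (objective: alternative, same O(n) cost).

-- ===== PORT A =====
-- one step of A's `for i, c in enumerate(seq)` loop body; state = (max_run, max_start, max_end, current_run, current_start)
def pvStepA (base : String) (s : Int × Int × Int × Int × Int) (i : Int) (c : Char) :
    Int × Int × Int × Int × Int :=
  let (max_run, max_start, max_end, current_run, current_start) := s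
  if [c] == base.toList then
    let current_start := if current_run == 0 then i else current_start
    let current_run := current_run + 1
    if current_run > max_run then
      (current_run, current_start, i + 1, current_run, current_start)
    else
      (max_run, max_start, max_end, current_run, current_start)
  else
    (max_run, max_start, max_end, 0, current_start)

-- the enumerate-loop itself, carrying the index i
def pvScanA (base : String) : List Char → Int → (Int × Int × Int × Int × Int) →
    Int × Int × Int × Int × Int
  | [], _, s => s
  | c :: rest, i, s => pvScanA base rest (i + 1) (pvStepA base s i c)

-- _find_longest_consecutive_run
def pvFindLongestRun (seq : String) (base : String) : Int × Int × Int :=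
  let s := pvScanA base seq.toList 0 (0, 0, 0, 0, 0)
  (s.1, s.2.1, s.2.2.1)

def is_polya_stretch_py (seq : String) (quals : Option (List Int)) (base : String) (min_len : Int) (min_qual : Int) : Bool :=
  if (seq.toList.length : Int) < min_len then false
  else
    let t := pvFindLongestRun seq base
    if t.1 < min_len then false
    else
      match quals with
      | none => true
      | some qs =>
        if (qs.length : Int) ≥ t.2.2 then
          let run_quals := PySem.List.slice qs (some t.2.1) (some t.2.2)
          if ((run_quals.filter (fun q => q ≥ min_qual)).length : Int) < min_len then false
          else true
        else true

-- ===== PORT B =====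
-- inner `while j < n and seq[j] == base` of Source B: length of the matching prefix
def pvCountPrefix (base : String) : List Char → Nat
  | [] => 0
  | c :: rest => if [c] == base.toList then pvCountPrefix base rest + 1 else 0

-- outer while loop of Source B: collect all maximal runs as (length, start, end)
def pvRuns (base : String) : List Char → Int → List (Int × Int × Int)
  | [], _ => []
  | c :: rest, i =>
    if [c] == base.toList then
      let k0 := pvCountPrefix base rest
      ((k0 + 1 : Int), i, i + (k0 + 1)) :: pvRuns base (rest.drop k0) (i + (k0 + 1))
    else
      pvRuns base rest (i + 1)
termination_by l _ => l.length
decreasing_by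
  · simp only [List.length_drop, List.length_cons]; omega
  · simp

-- max(runs, key=lambda r: r[0], default=(0,0,0)): first-on-tie via strict >
def pvMaxRun : List (Int × Int × Int) → Int × Int × Int
  | [] => (0, 0, 0)
  | r :: rs => rs.foldl (fun best r' => if r'.1 > best.1 then r' else best) r

def is_polya_stretch_py_alt (seq : String) (quals : Option (List Int)) (base : String) (min_len : Int) (min_qual : Int) : Bool :=
  if (seq.toList.length : Int) < min_len then false
  else
    let t := pvMaxRun (pvRuns base seq.toList 0)
    if t.1 < min_len then false
    else
      match quals with
      | none => true
      | some qs =>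
        if (qs.length : Int) ≥ t.2.2 then
          let run_quals := PySem.List.slice qs (some t.2.1) (some t.2.2)
          if ((run_quals.filter (fun q => q ≥ min_qual)).length : Int) < min_len then false
          else true
        else true

-- ===== PRECONDITION & SPEC =====
def Spec_is_polya_stretch_py (seq : String) (quals : Option (List Int)) (base : String) (min_len : Int) (min_qual : Int) (out : Bool) : Prop := out = is_polya_stretch_py_alt seq quals base min_len min_qual
instance (seq : String) (quals : Option (List Int)) (base : String) (min_len : Int) (min_qual : Int) (out : Bool) : Decidable (Spec_is_polya_stretch_py seq quals base min_len min_qual out) := by unfold Spec_is_polya_stretch_py; infer_instance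

-- ===== CLAIM (what is proved, stated in full; the proofs are below) =====
def Claim_equal_is_polya_stretch_py : Prop := ∀ (seq : String) (quals : Option (List Int)) (base : String) (min_len : Int) (min_qual : Int), Dom_is_polya_stretch_py seq quals base min_len min_qual → Spec_is_polya_stretch_py seq quals base min_len min_qual (is_polya_stretch_py seq quals base min_len min_qual)

-- ===== LEMMAS AND PROOFS =====

-- selection step shared by both characterisations
def pvSel (best r : Int × Int × Int) : Int × Int × Int := if r.1 > best.1 then r else best

theorem pvScanA_append (base : String) (l1 l2 : List Char) :
    ∀ (i : Int) s, pvScanA base (l1 ++ l2) i s =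
      pvScanA base l2 (i + l1.length) (pvScanA base l1 i s) := by
  induction l1 with
  | nil => simp [pvScanA]
  | cons c rest ih =>
    intro i s
    simp only [List.cons_append, pvScanA, ih, List.length_cons]
    push_cast
    ring_nf

-- Run lemma: scanning a block of matching chars starting at position cs + r with
-- current run r and best (m, ms, me), m >= r, extends the run by the block and
-- updates the best (once, in effect) iff the final run beats m.
theorem pvScanA_run (base : String) (l : List Char) :
    (∀ c ∈ l, [c] == base.toList) → ∀ (m ms me r cs : Int), r ≤ m →
    pvScanA base l (cs + r) (m, ms, me, r, cs) =
      (if r + l.length > m then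
        ((r + l.length : Int), cs, cs + r + l.length, r + l.length, cs)
       else (m, ms, me, r + l.length, cs)) := by
  induction l with
  | nil =>
    intro _ m ms me r cs hm
    simp only [pvScanA, List.length_nil, Nat.cast_zero, add_zero]
    rw [if_neg (by omega)]
  | cons c rest ih =>
    intro h m ms me r cs hm
    have hc : ([c] == base.toList) = true := h c (by simp)
    have hrest : ∀ c' ∈ rest, [c'] == base.toList := fun c' hc' => h c' (by simp [hc'])
    have hcs : (if (r == 0) = true then cs + r else cs) = cs := by
      split
      · next hr0 => simp at hr0; omega
      · rfl
    by_cases hgt : r + 1 > m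
    · have key := ih hrest (r + 1) cs (cs + (r + 1)) (r + 1) cs (le_refl _)
      simp only [pvScanA, pvStepA, hc, if_true, hcs, if_pos hgt,
        show cs + r + 1 = cs + (r + 1) by ring] at *
      rw [key]
      simp only [List.length_cons]
      push_cast
      split_ifs <;> simp only [Prod.mk.injEq, and_true, true_and] <;> omega
    · have key := ih hrest m ms me (r + 1) cs (by omega)
      simp only [pvScanA, pvStepA, hc, if_true, hcs, if_neg hgt,
        show cs + r + 1 = cs + (r + 1) by ring] at *
      rw [key]
      simp only [List.length_cons]
      push_cast
      split_ifs <;> simp only [Prod.mk.injEq, and_true, true_and] <;> omega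

theorem pvCountPrefix_le (base : String) (l : List Char) :
    pvCountPrefix base l ≤ l.length := by
  induction l with
  | nil => simp [pvCountPrefix]
  | cons c rest ih => simp only [pvCountPrefix, List.length_cons]; split <;> omega

theorem pvCountPrefix_take (base : String) (l : List Char) :
    ∀ c ∈ l.take (pvCountPrefix base l), [c] == base.toList := by
  induction l with
  | nil => simp
  | cons c rest ih =>
    simp only [pvCountPrefix]
    split
    · next hc =>
      intro c' hc'
      rcases List.mem_cons.mp (by simpa [List.take_succ_cons] using hc') with h | h
      · subst h; exact hc
      · exact ih c' h
    · simp

theorem pvCountPrefix_drop (base : String) (l : List Char) :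
    ∀ c' ∈ (l.drop (pvCountPrefix base l)).head?, ([c'] == base.toList) = false := by
  induction l with
  | nil => simp
  | cons c rest ih =>
    simp only [pvCountPrefix]
    split
    · next hc => simpa using ih
    · next hc => simpa using hc

-- Main invariant: A's scan (entered with current_run = 0) computes the pvSel-fold
-- of B's run list over the current best.
theorem pvScanA_runs_aux (base : String) (n : Nat) : ∀ (l : List Char), l.length ≤ n →
    ∀ (i m ms me cs : Int), 0 ≤ m →
    ((pvScanA base l i (m, ms, me, 0, cs)).1,
     (pvScanA base l i (m, ms, me, 0, cs)).2.1,
     (pvScanA base l i (m, ms, me, 0, cs)).2.2.1) =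
      (pvRuns base l i).foldl pvSel (m, ms, me) := by
  induction n with
  | zero =>
    intro l hl i m ms me cs _
    have : l = [] := List.length_eq_zero_iff.mp (Nat.le_zero.mp hl)
    subst this
    simp [pvScanA, pvRuns]
  | succ n ih =>
    intro l hl i m ms me cs hm
    match l with
    | [] => simp [pvScanA, pvRuns]
    | c :: rest =>
      by_cases hc : ([c] == base.toList) = true
      · -- a run of length (pvCountPrefix base rest) + 1 starts here
        have hk0le : pvCountPrefix base rest ≤ rest.length := pvCountPrefix_le base rest
        have hsplit : c :: rest =
            (c :: rest.take (pvCountPrefix base rest)) ++ rest.drop (pvCountPrefix base rest) := by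
          simp
        have hmatched : ∀ c' ∈ c :: rest.take (pvCountPrefix base rest), [c'] == base.toList := by
          intro c' hc'
          rcases List.mem_cons.mp hc' with h | h
          · subst h; exact hc
          · exact pvCountPrefix_take base rest c' h
        have hlen : (c :: rest.take (pvCountPrefix base rest)).length =
            pvCountPrefix base rest + 1 := by
          simp [List.length_take, Nat.min_eq_left hk0le]
        have hruns : pvRuns base (c :: rest) i =
            (((pvCountPrefix base rest : Int) + 1), i, i + ((pvCountPrefix base rest : Int) + 1)) ::
              pvRuns base (rest.drop (pvCountPrefix base rest))
                (i + ((pvCountPrefix base rest : Int) + 1)) := by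
          rw [pvRuns]
          simp [hc]
        -- first step overwrites current_start with i (current_run = 0), so cs is irrelevant
        have hstep : pvScanA base (c :: rest) i (m, ms, me, 0, cs) =
            pvScanA base (c :: rest) i (m, ms, me, 0, i) := by
          simp [pvScanA, pvStepA, hc]
        set k0 := pvCountPrefix base rest with hk0
        set b := pvSel (m, ms, me) (((k0:Int) + 1), i, i + ((k0:Int) + 1)) with hb
        have hstate : pvScanA base (c :: rest.take k0) i (m, ms, me, 0, i) =
            (b.1, b.2.1, b.2.2, (k0:Int) + 1, i) := by
          have hrun := pvScanA_run base (c :: rest.take k0) hmatched m ms me 0 i hm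
          rw [show i + (0:Int) = i from add_zero i] at hrun
          rw [hrun, hb]
          unfold pvSel
          rw [hlen]
          push_cast
          simp only [zero_add]
          split_ifs with hcond
          · rfl
          · rfl
        rw [hstep]
        conv_lhs => rw [hsplit]
        rw [pvScanA_append, hstate, hlen]
        rw [show i + ((k0 + 1 : Nat) : Int) = i + ((k0:Int) + 1) by push_cast; ring]
        rw [hruns, List.foldl_cons, ← hb]
        -- remaining input starts with a non-matching char (or is empty)
        have hb1 : 0 ≤ b.1 := by
          rw [hb]; unfold pvSel; split
          · simp; positivity
          · simpa using hm
        match hrest' : rest.drop k0 with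
        | [] => simp [pvScanA, pvRuns]
        | c' :: t =>
          have hnc : ([c'] == base.toList) = false := by
            have hd := pvCountPrefix_drop base rest
            rw [← hk0, hrest'] at hd
            exact hd c' (by simp)
          have hstep2 : pvScanA base (c' :: t) (i + ((k0:Int) + 1))
                (b.1, b.2.1, b.2.2, (k0:Int) + 1, i) =
              pvScanA base t (i + ((k0:Int) + 1) + 1) (b.1, b.2.1, b.2.2, 0, i) := by
            simp [pvScanA, pvStepA, hnc]
          have hruns2 : pvRuns base (c' :: t) (i + ((k0:Int) + 1)) =
              pvRuns base t (i + ((k0:Int) + 1) + 1) := by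
            rw [pvRuns]
            simp [hnc]
          have htlen : t.length ≤ n := by
            have h1 : (rest.drop k0).length = rest.length - k0 := List.length_drop ..
            rw [hrest'] at h1
            simp only [List.length_cons] at h1 hl
            omega
          rw [hstep2, hruns2]
          exact ih t htlen (i + ((k0:Int) + 1) + 1) b.1 b.2.1 b.2.2 i hb1
      · -- no run here: both sides skip this char
        have hstep : pvScanA base (c :: rest) i (m, ms, me, 0, cs) =
            pvScanA base rest (i + 1) (m, ms, me, 0, cs) := by
          simp [pvScanA, pvStepA, hc]
        have hruns : pvRuns base (c :: rest) i = pvRuns base rest (i + 1) := by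
          rw [pvRuns]
          simp [hc]
        rw [hstep, hruns]
        exact ih rest (by simp only [List.length_cons] at hl; omega) (i + 1) m ms me cs hm

theorem pvScanA_runs (base : String) (l : List Char) (i m ms me cs : Int) (hm : 0 ≤ m) :
    ((pvScanA base l i (m, ms, me, 0, cs)).1,
     (pvScanA base l i (m, ms, me, 0, cs)).2.1,
     (pvScanA base l i (m, ms, me, 0, cs)).2.2.1) =
      (pvRuns base l i).foldl pvSel (m, ms, me) :=
  pvScanA_runs_aux base l.length l (le_refl _) i m ms me cs hm

-- every run produced by pvRuns has positive length
theorem pvRuns_pos_aux (base : String) (n : Nat) : ∀ (l : List Char), l.length ≤ n →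
    ∀ (i : Int), ∀ r ∈ pvRuns base l i, 1 ≤ r.1 := by
  induction n with
  | zero =>
    intro l hl i
    have : l = [] := List.length_eq_zero_iff.mp (Nat.le_zero.mp hl)
    subst this
    simp [pvRuns]
  | succ n ih =>
    intro l hl i
    match l with
    | [] => simp [pvRuns]
    | c :: rest =>
      intro r hr
      rw [pvRuns] at hr
      by_cases hc : ([c] == base.toList) = true
      · rw [if_pos hc] at hr
        rcases List.mem_cons.mp hr with h | h
        · subst h; simp
        · have hdlen : (rest.drop (pvCountPrefix base rest)).length ≤ n := by
            have := List.length_drop (l := rest) (i := pvCountPrefix base rest)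
            simp only [List.length_cons] at hl
            omega
          exact ih _ hdlen _ r h
      · rw [if_neg hc] at hr
        exact ih rest (by simp only [List.length_cons] at hl; omega) (i + 1) r hr

theorem pvRuns_pos (base : String) (l : List Char) (i : Int) :
    ∀ r ∈ pvRuns base l i, 1 ≤ r.1 :=
  pvRuns_pos_aux base l.length l (le_refl _) i

theorem pvMaxRun_eq_foldl (base : String) (l : List Char) (i : Int) :
    pvMaxRun (pvRuns base l i) = (pvRuns base l i).foldl pvSel (0, 0, 0) := by
  cases h : pvRuns base l i with
  | nil => simp [pvMaxRun]
  | cons r rs =>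
    have hr : 1 ≤ r.1 := pvRuns_pos base l i r (by simp [h])
    simp only [pvMaxRun, List.foldl_cons, pvSel]
    rw [if_pos (show r.1 > ((0,0,0) : Int × Int × Int).1 by simp; omega)]
    rfl

theorem pvFindLongestRun_eq (seq base : String) :
    pvFindLongestRun seq base = pvMaxRun (pvRuns base seq.toList 0) := by
  rw [pvMaxRun_eq_foldl]
  exact pvScanA_runs base seq.toList 0 0 0 0 0 (le_refl _)

-- ===== VERDICT (by name: the statement is the Claim_ definition above) =====
theorem is_polya_stretch_py_spec : Claim_equal_is_polya_stretch_py := by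
  intro seq quals base min_len min_qual _
  unfold Spec_is_polya_stretch_py is_polya_stretch_py is_polya_stretch_py_alt
  rw [pvFindLongestRun_eq]
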